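-- pv_equiv track=rewrite | github.com/tanerijun/algo-slaying | apcs/小球落下.py | find_leaf
-- ===== SOURCE A (Python) =====
-- def find_leaf(D, I):
--     pos = 1  # initial position (root)
--     for _ in range(D - 1):
--         if I % 2 == 1:  # if I is odd, go left
--             pos = pos * 2  # update position to left child
--             I = (I + 1) // 2
--         else:  # if I is even, go right
--             pos = pos * 2 + 1  # update position to right child
--             I //= 2
--     return pos
-- ===== SOURCE B (Python) =====
-- def find_leaf(D, I):
--     # Closed-form: the level-j turn bit equals bit j of (I - 1); the leaf
--     # position is 1 followed by those bits, assembled as a weighted sum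
--     # (no branch, no sequential ball-index state).
--     m = I - 1
--     n = max(D - 1, 0)
--     return (1 << n) + sum(((m >> j) & 1) << (n - 1 - j) for j in range(n))
-- ===== Notes on version B (the rewrite author's own statement) =====
-- stated objective: alternative
-- what changed: B replaces A's stateful simulation (branch on parity, evolving ball index I) by a branch-free closed form: bit j of (I-1) is the level-j turn, so the leaf is 1 followed by those bits, assembled as one weighted sum.
import Mathlib
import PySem

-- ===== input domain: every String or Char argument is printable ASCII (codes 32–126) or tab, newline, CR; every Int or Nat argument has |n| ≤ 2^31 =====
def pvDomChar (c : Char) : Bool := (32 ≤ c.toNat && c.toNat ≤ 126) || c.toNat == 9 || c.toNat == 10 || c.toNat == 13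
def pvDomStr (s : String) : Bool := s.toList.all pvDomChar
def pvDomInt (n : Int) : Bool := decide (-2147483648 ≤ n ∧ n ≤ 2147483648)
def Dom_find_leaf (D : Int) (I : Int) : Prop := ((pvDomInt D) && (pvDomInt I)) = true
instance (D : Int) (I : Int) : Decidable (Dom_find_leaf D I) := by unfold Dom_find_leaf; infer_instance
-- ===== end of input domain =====

-- B replaces A's stateful parity-branch simulation with a branch-free closed-form
-- bit sum (objective: alternative); equivalence is proved on the whole domain.


-- ===== PORT A =====
-- loop body of A: n remaining iterations, state (pos, I)
def findLeafLoop : Nat → Int → Int → Int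
  | 0, pos, _ => pos
  | Nat.succ n, pos, I =>
    if PySem.Int.mod I 2 = 1 then
      findLeafLoop n (pos * 2) (PySem.Int.floordiv (I + 1) 2)
    else
      findLeafLoop n (pos * 2 + 1) (PySem.Int.floordiv I 2)

def find_leaf (D : Int) (I : Int) : Int :=
  findLeafLoop (D - 1).toNat 1 I   -- range(D - 1) runs (D-1).toNat times

-- ===== PORT B =====
-- exact ports of the Python int ops used by Source B (all exact for negative m too):
-- `1 << n` = 2^n (n ≥ 0); `m >> j` = floor-division by 2^j; `x & 1` = x mod 2;
-- `b << k` = b * 2^k; sum(...) over range(n) = .sum of the mapped pyRange.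
def find_leaf_alt (D : Int) (I : Int) : Int :=
  let m := I - 1
  let n : Int := max (D - 1) 0
  2 ^ n.toNat +
    (((PySem.List.pyRange 0 n 1).map
        (fun j => (PySem.Int.mod (PySem.Int.floordiv m (2 ^ j.toNat)) 2) * 2 ^ ((n - 1 - j).toNat))).sum)

-- ===== PRECONDITION & SPEC =====
def Spec_find_leaf (D : Int) (I : Int) (out : Int) : Prop := out = find_leaf_alt D I
instance (D : Int) (I : Int) (out : Int) : Decidable (Spec_find_leaf D I out) := by unfold Spec_find_leaf; infer_instance

-- ===== CLAIM (what is proved, stated in full; the proofs are below) =====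
def Claim_equal_find_leaf : Prop := ∀ (D : Int) (I : Int), Dom_find_leaf D I → Spec_find_leaf D I (find_leaf D I)

-- ===== LEMMAS AND PROOFS =====

-- W n m = the number whose binary digits (most significant first) are bits 0..n-1 of m
def pvW : Nat → Int → Int
  | 0, _ => 0
  | Nat.succ n, m => (m % 2) * 2 ^ n + pvW n (m / 2)

lemma pvLoop_eq_W : ∀ (n : Nat) (pos m : Int),
    findLeafLoop n pos (m + 1) = pos * 2 ^ n + pvW n m := by
  intro n
  induction n with
  | zero => intro pos m; simp [findLeafLoop, pvW]
  | succ n ih =>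
    intro pos m
    simp only [findLeafLoop, pvW]
    rw [PySem.Int.mod_eq_emod_of_pos (by norm_num),
        PySem.Int.floordiv_eq_ediv_of_pos (by norm_num),
        PySem.Int.floordiv_eq_ediv_of_pos (by norm_num)]
    by_cases h : (m + 1) % 2 = 1
    · rw [if_pos h]
      have h2 : (m + 1 + 1) / 2 = m / 2 + 1 := by omega
      have h0 : m % 2 = 0 := by omega
      rw [h2, ih]
      rw [h0]; ring
    · rw [if_neg h]
      have h2 : (m + 1) / 2 = m / 2 + 1 := by omega
      have h1 : m % 2 = 1 := by omega
      rw [h2, ih]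
      rw [h1]; ring

lemma pvSum_eq_W : ∀ (n : Nat) (m : Int),
    ((List.range n).map (fun j => (m / 2 ^ j % 2) * 2 ^ (n - 1 - j))).sum = pvW n m := by
  intro n
  induction n with
  | zero => intro m; simp [pvW]
  | succ n ih =>
    intro m
    rw [List.range_succ_eq_map]
    simp only [List.map_cons, List.map_map, List.sum_cons, pvW]
    have : ((List.range n).map ((fun j => m / 2 ^ j % 2 * 2 ^ (n + 1 - 1 - j)) ∘ Nat.succ)).sum
        = ((List.range n).map (fun j => (m / 2) / 2 ^ j % 2 * 2 ^ (n - 1 - j))).sum := by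
      apply congrArg
      apply List.map_congr_left
      intro j hj
      simp only [Function.comp, Nat.succ_eq_add_one]
      have hshift : m / 2 / 2 ^ j = m / 2 ^ (j + 1) := by
        rw [Int.ediv_ediv_of_nonneg (by norm_num)]
        norm_num [pow_succ, Int.mul_comm]
      have hexp : n + 1 - 1 - (j + 1) = n - 1 - j := by omega
      rw [hshift, hexp]
    rw [this, ih]
    simp

-- B's port equals 2^n + the List.range sum (eliminating the PySem wrappers)
lemma pvAlt_eq (D I : Int) :
    find_leaf_alt D I
      = 2 ^ (D - 1).toNat
        + ((List.range (D - 1).toNat).map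
            (fun j => ((I - 1) / 2 ^ j % 2) * 2 ^ ((D - 1).toNat - 1 - j))).sum := by
  show 2 ^ (max (D - 1) 0).toNat +
      (((PySem.List.pyRange 0 (max (D - 1) 0) 1).map
        (fun j => (PySem.Int.mod (PySem.Int.floordiv (I - 1) (2 ^ j.toNat)) 2)
            * 2 ^ ((max (D - 1) 0 - 1 - j).toNat))).sum) = _
  have hmax : (max (D - 1) 0).toNat = (D - 1).toNat := by omega
  have hmax0 : (max (D - 1) 0 - 0).toNat = (D - 1).toNat := by omega
  rw [PySem.List.pyRange_one, List.map_map, hmax, hmax0]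
  congr 1
  apply congrArg
  apply List.map_congr_left
  intro j hj
  have hj' : j < (D - 1).toNat := by
    have := List.mem_range.mp hj
    omega
  simp only [Function.comp]
  rw [PySem.Int.mod_eq_emod_of_pos (by positivity),
      PySem.Int.floordiv_eq_ediv_of_pos (by positivity)]
  have h0 : ((0 : Int) + (j : Int)) = (j : Int) := by ring
  rw [h0, Int.toNat_natCast]
  have he : (max (D - 1) 0 - 1 - (j : Int)).toNat = (D - 1).toNat - 1 - j := by omega
  rw [he]

-- ===== VERDICT (by name: the statement is the Claim_ definition above) =====
theorem find_leaf_spec : Claim_equal_find_leaf := by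
  intro D I _
  unfold Spec_find_leaf
  rw [pvAlt_eq]
  unfold find_leaf
  have := pvLoop_eq_W ((D - 1).toNat) 1 (I - 1)
  simp only [sub_add_cancel] at this
  rw [this, pvSum_eq_W, one_mul]
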